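-- pv_equiv track=rewrite | github.com/zulip/zulip | zerver/views/message_fetch.py | highlight_string
-- ===== SOURCE A (Python) =====
-- from typing import Any, Callable, Dict, Iterable, List, Optional, Sequence, Tuple, Union
--
-- def highlight_string(text: str, locs: Iterable[Tuple[int, int]]) -> str:
--     highlight_start = '<span class="highlight">'
--     highlight_stop = "</span>"
--     pos = 0
--     result = ""
--     in_tag = False
--
--     for loc in locs:
--         (offset, length) = loc
--
--         prefix_start = pos
--         prefix_end = offset
--         match_start = offset
--         match_end = offset + length
--
--         prefix = text[prefix_start:prefix_end]
--         match = text[match_start:match_end]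
--
--         for character in prefix + match:
--             if character == "<":
--                 in_tag = True
--             elif character == ">":
--                 in_tag = False
--         if in_tag:
--             result += prefix
--             result += match
--         else:
--             result += prefix
--             result += highlight_start
--             result += match
--             result += highlight_stop
--         pos = match_end
--
--     result += text[pos:]
--     return result
-- ===== SOURCE B (Python) =====
-- def highlight_string(text, locs):
--     highlight_start = '<span class="highlight">'
--     highlight_stop = "</span>"
--     # stage 1: cut the text into (prefix, match) segments
--     segs = []
--     pos = 0
--     for offset, length in locs:
--         segs.append((text[pos:offset], text[offset:offset + length]))
--         pos = offset + length
--     # stage 2: each segment's effect on the tag state is its last angle bracket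
--     # (or None); forward-fill the effects to get the prevailing bracket per segment
--     effs = [next((c for c in reversed(p + m) if c in "<>"), None) for p, m in segs]
--     states = []
--     last = None
--     for e in effs:
--         if e is not None:
--             last = e
--         states.append(last)
--     # stage 3: assemble; a match is left unwrapped exactly when the prevailing bracket is '<'
--     parts = [
--         p + m if st == "<" else p + highlight_start + m + highlight_stop
--         for (p, m), st in zip(segs, states)
--     ]
--     parts.append(text[pos:])
--     return "".join(parts)
-- ===== Notes on version B (the rewrite author's own statement) =====
-- stated objective: alternative
-- what changed: A's single pass with a per-character in_tag state machine is replaced by a three-stage pipeline: cut the text into segments, map each segment to its tag effect (its last angle bracket, if any) and forward-fill those effects, then assemble the parts and join once.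
import Mathlib
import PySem

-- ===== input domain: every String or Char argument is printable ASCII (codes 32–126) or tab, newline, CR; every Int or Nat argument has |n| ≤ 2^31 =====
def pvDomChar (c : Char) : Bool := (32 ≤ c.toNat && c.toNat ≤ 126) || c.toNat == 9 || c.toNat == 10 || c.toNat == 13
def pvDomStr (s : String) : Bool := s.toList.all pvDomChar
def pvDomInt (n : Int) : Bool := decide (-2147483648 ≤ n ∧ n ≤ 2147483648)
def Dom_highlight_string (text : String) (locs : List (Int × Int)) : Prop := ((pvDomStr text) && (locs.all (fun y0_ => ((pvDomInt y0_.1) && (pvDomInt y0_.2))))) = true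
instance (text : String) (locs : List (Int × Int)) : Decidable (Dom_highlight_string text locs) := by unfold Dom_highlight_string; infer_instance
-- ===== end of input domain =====

-- B replaces A's single-pass per-character in_tag state machine by a staged pipeline
-- (segments, per-segment tag effects forward-filled, then assembly with one join).

-- ===== PORT A =====
-- one iteration of A's loop over locs; state = (pos, result, in_tag)
def hsStepA (cs : List Char) (st : Int × List Char × Bool) (loc : Int × Int) : Int × List Char × Bool :=
  let pos := st.1
  let result := st.2.1
  let in_tag := st.2.2
  let offset := loc.1
  let length := loc.2
  let pfx := PySem.List.slice cs (some pos) (some offset)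
  let mtch := PySem.List.slice cs (some offset) (some (offset + length))
  let in_tag2 := (pfx ++ mtch).foldl
    (fun t c => if c = '<' then true else if c = '>' then false else t) in_tag
  let result2 :=
    if in_tag2 then result ++ pfx ++ mtch
    else result ++ pfx ++ "<span class=\"highlight\">".toList ++ mtch ++ "</span>".toList
  (offset + length, result2, in_tag2)

def highlight_string (text : String) (locs : List (Int × Int)) : String :=
  let cs := text.toList
  let st := locs.foldl (hsStepA cs) (0, [], false)
  String.ofList (st.2.1 ++ PySem.List.slice cs (some st.1) none)

-- ===== PORT B =====
-- stage-1 step: st = (pos, segs); appends the next (prefix, match) pair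
def hsSegStep (cs : List Char) (st : Int × List (List Char × List Char)) (loc : Int × Int) :
    Int × List (List Char × List Char) :=
  (loc.1 + loc.2,
   st.2 ++ [(PySem.List.slice cs (some st.1) (some loc.1),
             PySem.List.slice cs (some loc.1) (some (loc.1 + loc.2)))])

-- port of B's `next((c for c in reversed(p + m) if c in "<>"), None)`
def hsEff (s : List Char × List Char) : Option Char :=
  (s.1 ++ s.2).reverse.find? (fun c => c == '<' || c == '>')

-- stage-2 step: st = (last, states); forward-fills the effects
def hsFillStep (st : Option Char × List (Option Char)) (e : Option Char) :
    Option Char × List (Option Char) :=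
  let last := match e with | some c => some c | none => st.1
  (last, st.2 ++ [last])

def hsPiece (x : (List Char × List Char) × Option Char) : List Char :=
  if x.2 == some '<' then x.1.1 ++ x.1.2
  else x.1.1 ++ "<span class=\"highlight\">".toList ++ x.1.2 ++ "</span>".toList

def highlight_string_alt (text : String) (locs : List (Int × Int)) : String :=
  let cs := text.toList
  let st1 := locs.foldl (hsSegStep cs) (0, [])
  let effs := st1.2.map hsEff
  let states := (effs.foldl hsFillStep (none, [])).2
  let parts := (st1.2.zip states).map hsPiece
  String.ofList ((parts ++ [PySem.List.slice cs (some st1.1) none]).flatten)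

-- ===== PRECONDITION & SPEC =====
def Spec_highlight_string (text : String) (locs : List (Int × Int)) (out : String) : Prop := out = highlight_string_alt text locs
instance (text : String) (locs : List (Int × Int)) (out : String) : Decidable (Spec_highlight_string text locs out) := by unfold Spec_highlight_string; infer_instance

-- ===== CLAIM (what is proved, stated in full; the proofs are below) =====
def Claim_equal_highlight_string : Prop := ∀ (text : String) (locs : List (Int × Int)), Dom_highlight_string text locs → Spec_highlight_string text locs (highlight_string text locs)

-- ===== LEMMAS AND PROOFS =====

-- recursive reference forms of B's stages
def hsSpecSegs (cs : List Char) (pos : Int) : List (Int × Int) → List (List Char × List Char)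
  | [] => []
  | l :: r =>
      (PySem.List.slice cs (some pos) (some l.1),
       PySem.List.slice cs (some l.1) (some (l.1 + l.2))) :: hsSpecSegs cs (l.1 + l.2) r

def hsSpecPos (pos : Int) : List (Int × Int) → Int
  | [] => pos
  | l :: r => hsSpecPos (l.1 + l.2) r

def hsFillRec (last : Option Char) : List (Option Char) → List (Option Char)
  | [] => []
  | e :: r =>
      let l' := match e with | some c => some c | none => last
      l' :: hsFillRec l' r

-- the combined reference pipeline
def hsSpecPieces (cs : List Char) (pos : Int) (last : Option Char) : List (Int × Int) → List (List Char)
  | [] => []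
  | l :: r =>
      let p := PySem.List.slice cs (some pos) (some l.1)
      let m := PySem.List.slice cs (some l.1) (some (l.1 + l.2))
      let last' := match hsEff (p, m) with | some c => some c | none => last
      hsPiece ((p, m), last') :: hsSpecPieces cs (l.1 + l.2) last' r

theorem segStep_eq (cs : List Char) (locs : List (Int × Int)) (pos : Int)
    (acc : List (List Char × List Char)) :
    locs.foldl (hsSegStep cs) (pos, acc) = (hsSpecPos pos locs, acc ++ hsSpecSegs cs pos locs) := by
  induction locs generalizing pos acc with
  | nil => simp [hsSpecPos, hsSpecSegs]
  | cons l r ih => simp [hsSegStep, hsSpecPos, hsSpecSegs, ih]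

theorem fillStep_eq (effs : List (Option Char)) (last : Option Char) (acc : List (Option Char)) :
    (effs.foldl hsFillStep (last, acc)).2 = acc ++ hsFillRec last effs := by
  induction effs generalizing last acc with
  | nil => simp [hsFillRec]
  | cons e r ih => simp [hsFillStep, hsFillRec, ih]

theorem zipmap_eq (cs : List Char) (locs : List (Int × Int)) (pos : Int) (last : Option Char) :
    ((hsSpecSegs cs pos locs).zip (hsFillRec last ((hsSpecSegs cs pos locs).map hsEff))).map hsPiece
      = hsSpecPieces cs pos last locs := by
  induction locs generalizing pos last with
  | nil => simp [hsSpecSegs, hsSpecPieces, hsFillRec]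
  | cons l r ih => simp [hsSpecSegs, hsSpecPieces, hsFillRec, ih]

-- A's forward tag-state fold equals "last angle bracket decides, else keep"
theorem tagFold_eq (l : List Char) (t : Bool) :
    l.foldl (fun t c => if c = '<' then true else if c = '>' then false else t) t
      = (match l.reverse.find? (fun c => c == '<' || c == '>') with
         | some c => c == '<' | none => t) := by
  induction l generalizing t with
  | nil => simp
  | cons a l ih =>
    simp only [List.foldl_cons, ih, List.reverse_cons, List.find?_append]
    cases h : l.reverse.find? (fun c => c == '<' || c == '>') with
    | some c => simp
    | none =>
      by_cases ha : a = '<'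
      · simp [ha]
      · by_cases hb : a = '>'
        · simp [hb]
        · simp [ha, hb]

-- A's loop tracks the reference pipeline
theorem foldA_eq (cs : List Char) (locs : List (Int × Int)) (pos : Int) (res : List Char)
    (tag : Bool) (last : Option Char) (h : tag = (last == some '<')) :
    (locs.foldl (hsStepA cs) (pos, res, tag)).1 = hsSpecPos pos locs ∧
    (locs.foldl (hsStepA cs) (pos, res, tag)).2.1
      = res ++ (hsSpecPieces cs pos last locs).flatten := by
  induction locs generalizing pos res tag last with
  | nil => simp [hsSpecPos, hsSpecPieces]
  | cons l r ih =>
    simp only [List.foldl_cons, hsStepA, hsSpecPos, hsSpecPieces]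
    set p := PySem.List.slice cs (some pos) (some l.1) with hp
    set m := PySem.List.slice cs (some l.1) (some (l.1 + l.2)) with hm
    set last' : Option Char :=
      (match hsEff (p, m) with | some c => some c | none => last) with hl'
    have htag : (p ++ m).foldl
        (fun t c => if c = '<' then true else if c = '>' then false else t) tag
        = (last' == some '<') := by
      rw [tagFold_eq]
      have heq : hsEff (p, m) = (p ++ m).reverse.find? (fun c => c == '<' || c == '>') := rfl
      rw [hl', heq]
      cases he : (p ++ m).reverse.find? (fun c => c == '<' || c == '>') with
      | some c => simp
      | none => simp [h]
    rw [htag]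
    have := ih (l.1 + l.2)
      (if (last' == some '<') then res ++ p ++ m
       else res ++ p ++ "<span class=\"highlight\">".toList ++ m ++ "</span>".toList)
      (last' == some '<') last' rfl
    refine ⟨this.1, ?_⟩
    rw [this.2]
    by_cases hc : last' = some '<' <;> simp [hc, hsPiece]

-- ===== VERDICT (by name: the statement is the Claim_ definition above) =====
theorem highlight_string_spec : Claim_equal_highlight_string := by
  intro text locs _
  unfold Spec_highlight_string
  have e1 : highlight_string text locs
      = String.ofList ((locs.foldl (hsStepA text.toList) (0, [], false)).2.1
          ++ PySem.List.slice text.toList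
               (some (locs.foldl (hsStepA text.toList) (0, [], false)).1) none) := rfl
  have e2 : highlight_string_alt text locs
      = String.ofList
          ((((locs.foldl (hsSegStep text.toList) (0, [])).2.zip
              ((((locs.foldl (hsSegStep text.toList) (0, [])).2.map hsEff).foldl
                  hsFillStep (none, [])).2)).map hsPiece
            ++ [PySem.List.slice text.toList
                  (some (locs.foldl (hsSegStep text.toList) (0, [])).1) none]).flatten) := rfl
  rw [e1, e2, segStep_eq, fillStep_eq]
  have hA := foldA_eq text.toList locs 0 [] false none rfl
  rw [hA.1, hA.2]
  simp [zipmap_eq, List.flatten_append]
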